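-- pv_equiv track=rewrite | github.com/skyplane-project/skyplane | skylark/compute/azure/azure_cloud_provider.py | lookup_continent
-- ===== SOURCE A (Python) =====
-- def lookup_continent(region: str) -> str:
--     lookup_dict = {
--         "oceania": {"australiaeast", "australiacentral", "australiasoutheast", "australiacentral2"},
--         "asia": {
--             "eastasia",
--             "japaneast",
--             "japanwest",
--             "koreacentral",
--             "koreasouth",
--             "southeastasia",
--             "southindia",
--             "centralindia",
--             "westindia",
--             "jioindiacentral",
--             "jioindiawest",
--         },
--         "north-america": {
--             "canadacentral",
--             "canadaeast",
--             "centralus",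
--             "eastus",
--             "eastus2",
--             "northcentralus",
--             "westus",
--             "westus2",
--             "westus3",
--             "southcentralus",
--             "westcentralus",
--         },
--         "south-america": {"brazilsouth", "brazilsoutheast"},
--         "europe": {
--             "francecentral",
--             "germanywestcentral",
--             "northeurope",
--             "norwayeast",
--             "swedencentral",
--             "switzerlandnorth",
--             "switzerlandwest",
--             "westeurope",
--             "uksouth",
--             "ukwest",
--             "francesouth",
--             "germanynorth",
--             "norwaywest",
--         },
--         "africa": {"southafricanorth", "southafricawest"},
--         "middle-east": {"uaenorth", "uaecentral"},
--     }
--     for continent, regions in lookup_dict.items():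
--         if region in regions:
--             return continent
--     return "unknown"
-- ===== SOURCE B (Python) =====
-- _CONTINENT_BY_REGION = {
--     "australiaeast": "oceania",
--     "australiacentral": "oceania",
--     "australiasoutheast": "oceania",
--     "australiacentral2": "oceania",
--     "eastasia": "asia",
--     "japaneast": "asia",
--     "japanwest": "asia",
--     "koreacentral": "asia",
--     "koreasouth": "asia",
--     "southeastasia": "asia",
--     "southindia": "asia",
--     "centralindia": "asia",
--     "westindia": "asia",
--     "jioindiacentral": "asia",
--     "jioindiawest": "asia",
--     "canadacentral": "north-america",
--     "canadaeast": "north-america",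
--     "centralus": "north-america",
--     "eastus": "north-america",
--     "eastus2": "north-america",
--     "northcentralus": "north-america",
--     "westus": "north-america",
--     "westus2": "north-america",
--     "westus3": "north-america",
--     "southcentralus": "north-america",
--     "westcentralus": "north-america",
--     "brazilsouth": "south-america",
--     "brazilsoutheast": "south-america",
--     "francecentral": "europe",
--     "germanywestcentral": "europe",
--     "northeurope": "europe",
--     "norwayeast": "europe",
--     "swedencentral": "europe",
--     "switzerlandnorth": "europe",
--     "switzerlandwest": "europe",
--     "westeurope": "europe",
--     "uksouth": "europe",
--     "ukwest": "europe",
--     "francesouth": "europe",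
--     "germanynorth": "europe",
--     "norwaywest": "europe",
--     "southafricanorth": "africa",
--     "southafricawest": "africa",
--     "uaenorth": "middle-east",
--     "uaecentral": "middle-east",
-- }
--
--
-- def lookup_continent(region: str) -> str:
--     return _CONTINENT_BY_REGION.get(region, "unknown")
-- ===== Notes on version B (the rewrite author's own statement) =====
-- stated objective: simpler
-- what changed: Replaces the continent-to-set-of-regions table plus a scan over its items by a single flat region-to-continent dict with one .get lookup and no loop.
import Mathlib
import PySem

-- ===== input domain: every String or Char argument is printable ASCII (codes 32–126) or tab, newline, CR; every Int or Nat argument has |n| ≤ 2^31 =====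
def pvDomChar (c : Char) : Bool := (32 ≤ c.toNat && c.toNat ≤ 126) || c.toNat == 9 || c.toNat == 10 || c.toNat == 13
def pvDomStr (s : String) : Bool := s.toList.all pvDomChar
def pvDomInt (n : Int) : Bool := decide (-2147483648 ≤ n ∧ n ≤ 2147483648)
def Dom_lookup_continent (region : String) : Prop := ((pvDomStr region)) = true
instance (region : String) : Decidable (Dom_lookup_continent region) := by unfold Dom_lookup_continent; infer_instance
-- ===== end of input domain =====

-- B replaces A's continent→set table and scan loop by one flat region→continent dict with a single lookup (objective: simpler).

-- ===== PORT A =====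
-- A's lookup_dict (dict of continent → set of regions), in Python insertion order
def pvLookupDict : List (String × List String) := [
  ("oceania", ["australiaeast", "australiacentral", "australiasoutheast", "australiacentral2"]),
  ("asia", ["eastasia", "japaneast", "japanwest", "koreacentral", "koreasouth", "southeastasia", "southindia", "centralindia", "westindia", "jioindiacentral", "jioindiawest"]),
  ("north-america", ["canadacentral", "canadaeast", "centralus", "eastus", "eastus2", "northcentralus", "westus", "westus2", "westus3", "southcentralus", "westcentralus"]),
  ("south-america", ["brazilsouth", "brazilsoutheast"]),
  ("europe", ["francecentral", "germanywestcentral", "northeurope", "norwayeast", "swedencentral", "switzerlandnorth", "switzerlandwest", "westeurope", "uksouth", "ukwest", "francesouth", "germanynorth", "norwaywest"]),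
  ("africa", ["southafricanorth", "southafricawest"]),
  ("middle-east", ["uaenorth", "uaecentral"])
]

-- the 'for continent, regions in lookup_dict.items(): if region in regions: return continent' loop
def pvScan : List (String × List String) → String → String
  | [], _ => "unknown"
  | (c, rs) :: t, r => if rs.contains r then c else pvScan t r

def lookup_continent (region : String) : String := pvScan pvLookupDict region

-- ===== PORT B =====
-- Source B's flat module-level dict _CONTINENT_BY_REGION
def pvContinentByRegion : PySem.Dict String String := PySem.Dict.ofList [
  ("australiaeast", "oceania"),
  ("australiacentral", "oceania"),
  ("australiasoutheast", "oceania"),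
  ("australiacentral2", "oceania"),
  ("eastasia", "asia"),
  ("japaneast", "asia"),
  ("japanwest", "asia"),
  ("koreacentral", "asia"),
  ("koreasouth", "asia"),
  ("southeastasia", "asia"),
  ("southindia", "asia"),
  ("centralindia", "asia"),
  ("westindia", "asia"),
  ("jioindiacentral", "asia"),
  ("jioindiawest", "asia"),
  ("canadacentral", "north-america"),
  ("canadaeast", "north-america"),
  ("centralus", "north-america"),
  ("eastus", "north-america"),
  ("eastus2", "north-america"),
  ("northcentralus", "north-america"),
  ("westus", "north-america"),
  ("westus2", "north-america"),
  ("westus3", "north-america"),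
  ("southcentralus", "north-america"),
  ("westcentralus", "north-america"),
  ("brazilsouth", "south-america"),
  ("brazilsoutheast", "south-america"),
  ("francecentral", "europe"),
  ("germanywestcentral", "europe"),
  ("northeurope", "europe"),
  ("norwayeast", "europe"),
  ("swedencentral", "europe"),
  ("switzerlandnorth", "europe"),
  ("switzerlandwest", "europe"),
  ("westeurope", "europe"),
  ("uksouth", "europe"),
  ("ukwest", "europe"),
  ("francesouth", "europe"),
  ("germanynorth", "europe"),
  ("norwaywest", "europe"),
  ("southafricanorth", "africa"),
  ("southafricawest", "africa"),
  ("uaenorth", "middle-east"),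
  ("uaecentral", "middle-east")
]

-- _CONTINENT_BY_REGION.get(region, "unknown")
def lookup_continent_alt (region : String) : String := pvContinentByRegion.getD region "unknown"

-- ===== PRECONDITION & SPEC =====
def Spec_lookup_continent (region : String) (out : String) : Prop := out = lookup_continent_alt region
instance (region : String) (out : String) : Decidable (Spec_lookup_continent region out) := by unfold Spec_lookup_continent; infer_instance

-- ===== CLAIM (what is proved, stated in full; the proofs are below) =====
def Claim_equal_lookup_continent : Prop := ∀ (region : String), Dom_lookup_continent region → Spec_lookup_continent region (lookup_continent region)

-- ===== LEMMAS AND PROOFS =====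

-- flatten a continent→regions table into a region→continent association list
def pvFlatten (l : List (String × List String)) : List (String × String) :=
  l.flatMap (fun p => p.2.map (fun r => (r, p.1)))

lemma get?_mk_map_append (rs : List String) (c : String) (rest : List (String × String)) (r : String) :
    (PySem.Dict.mk (rs.map (fun x => (x, c)) ++ rest)).get? r
      = if rs.contains r then some c else (PySem.Dict.mk rest).get? r := by
  induction rs with
  | nil => simp
  | cons x t ih =>
      simp only [List.map_cons, List.cons_append, PySem.Dict.get?_mk_cons, List.contains_cons, ih]
      by_cases h : x = r
      · simp [h]
      · have h' : r ≠ x := fun hr => h hr.symm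
        simp [beq_false_of_ne h, beq_false_of_ne h']

lemma scan_eq_getD_flatten (l : List (String × List String)) (r : String) :
    pvScan l r = (PySem.Dict.mk (pvFlatten l)).getD r "unknown" := by
  induction l with
  | nil => simp [pvScan, pvFlatten, PySem.Dict.getD_eq_get?_getD, PySem.Dict.get?]
  | cons p t ih =>
      obtain ⟨c, rs⟩ := p
      simp only [pvScan, pvFlatten, List.flatMap_cons, PySem.Dict.getD_eq_get?_getD,
        get?_mk_map_append] at *
      by_cases h : r ∈ rs
      · simp [h]
      · simp [h, ih]

-- Source B's dict literal has 45 distinct keys: ofList builds exactly the flattened table of A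
set_option maxRecDepth 8192 in
lemma continentByRegion_eq : pvContinentByRegion = PySem.Dict.mk (pvFlatten pvLookupDict) := by
  decide

-- ===== VERDICT (by name: the statement is the Claim_ definition above) =====
theorem lookup_continent_spec : Claim_equal_lookup_continent := by
  intro region _
  unfold Spec_lookup_continent lookup_continent lookup_continent_alt
  rw [continentByRegion_eq, scan_eq_getD_flatten]
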